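-- pv_equiv track=rewrite | github.com/E-wave112/challenge-of-the-5th- | Osagie_Iyayi_Day5.py | faithful
-- ===== SOURCE A (Python) =====
-- def faithful(n):
-- 	'''
-- 	this function is aimed at finding the value of a faithful number within a given position
-- 	'''
-- 	n>0
-- 	x = str(int(bin(n)[2:]))
-- 	y = x[::-1]
-- 	f = 0
-- 	p = 0
-- 	for i in y :
-- 		t = int(i)*7**f
-- 		f = f + 1
-- 		p = p + t
-- 	return str(p) +  ' is our faithful number in this case'
-- ===== SOURCE B (Python) =====
-- def _value(s):
--     # base-7 value of the digit string s, peeling the last digit: Horner from the back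
--     if s == '':
--         return 0
--     return 7 * _value(s[:-1]) + int(s[-1])
--
-- def faithful(n):
--     x = str(int(bin(n)[2:]))
--     return str(_value(x)) + ' is our faithful number in this case'
-- ===== Notes on version B (the rewrite author's own statement) =====
-- stated objective: alternative
-- what changed: replaces A's reverse-the-string loop that sums int(c)*7**f with an incrementing exponent counter by a recursive helper that peels the last digit and evaluates the same base-7 value by multiply-add (Horner), with no reversal, no exponent counter and no exponentiation
import Mathlib
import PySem

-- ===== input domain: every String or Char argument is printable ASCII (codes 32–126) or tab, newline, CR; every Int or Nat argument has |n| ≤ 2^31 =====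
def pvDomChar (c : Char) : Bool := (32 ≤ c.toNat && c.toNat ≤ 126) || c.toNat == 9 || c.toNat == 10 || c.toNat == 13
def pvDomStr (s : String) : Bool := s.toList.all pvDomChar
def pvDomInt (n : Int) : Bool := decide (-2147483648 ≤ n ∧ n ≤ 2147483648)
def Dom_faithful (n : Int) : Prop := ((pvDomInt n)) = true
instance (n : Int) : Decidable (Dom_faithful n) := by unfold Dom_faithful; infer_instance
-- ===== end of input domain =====

-- B replaces A's reverse + int(c)*7**f loop by a recursive helper peeling the last digit (multiply-add Horner); return value only.

-- ===== PORT A =====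
-- bin(m) for m > 0, without the '0b' prefix: binary digits, most significant first
def pvBinChars : Nat → List Char
  | 0 => []
  | (m + 1) => pvBinChars ((m + 1) / 2) ++ [if (m + 1) % 2 = 1 then '1' else '0']
decreasing_by exact Nat.div_lt_self (Nat.succ_pos m) (by omega)

-- bin(n)[2:] (for n < 0 Python yields 'b…', on which int() then raises; such n are outside Pre_)
def pvBinStr (n : Int) : List Char :=
  if n = 0 then ['0']
  else if n < 0 then 'b' :: pvBinChars n.natAbs
  else pvBinChars n.toNat

-- x = str(int(bin(n)[2:])) — this line is verbatim in both A and B, hence a shared helper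
def pvX (n : Int) : List Char :=
  PySem.Int.toChars ((PySem.Int.ofChars? (pvBinStr n)).getD 0)

def faithful (n : Int) : String :=
  let x := pvX n
  let y := x.reverse
  let fp : Nat × Int :=
    y.foldl (fun st i => (st.1 + 1, st.2 + ((PySem.Int.ofChars? [i]).getD 0) * 7 ^ st.1)) (0, 0)
  PySem.Int.toStr fp.2 ++ " is our faithful number in this case"

-- ===== PORT B =====
-- _value(s): 0 if s == '' else 7*_value(s[:-1]) + int(s[-1])
def pvValue (s : List Char) : Int :=
  if h : s = [] then 0
  else 7 * pvValue s.dropLast + (PySem.Int.ofChars? [s.getLast h]).getD 0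
termination_by s.length
decreasing_by
  have := List.length_pos_of_ne_nil h
  simp only [List.length_dropLast]
  omega

def faithful_alt (n : Int) : String :=
  PySem.Int.toStr (pvValue (pvX n)) ++ " is our faithful number in this case"

-- ===== PRECONDITION & SPEC =====
-- Pre_ excludes n < 0, where Python A raises ValueError (int('b…')); B raises there too.
def Pre_faithful (n : Int) : Prop := 0 ≤ n
instance (n : Int) : Decidable (Pre_faithful n) := by unfold Pre_faithful; infer_instance
def pvWitness_faithful : Int := 6

def Spec_faithful (n : Int) (out : String) : Prop := out = faithful_alt n
instance (n : Int) (out : String) : Decidable (Spec_faithful n out) := by unfold Spec_faithful; infer_instance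

-- ===== CLAIM (what is proved, stated in full; the proofs are below) =====
def Claim_equal_faithful : Prop := ∀ (n : Int), Dom_faithful n → Pre_faithful n → Spec_faithful n (faithful n)

-- ===== LEMMAS AND PROOFS =====

-- peeling the last digit off B's recursion
theorem pvValue_append (cs : List Char) (c : Char) :
    pvValue (cs ++ [c]) = 7 * pvValue cs + (PySem.Int.ofChars? [c]).getD 0 := by
  rw [pvValue]
  simp

-- A's reversed powers-loop computes B's recursive value, for any digit list:
-- state with a general initial pair so the induction goes through
theorem pv_loop_general (cs : List Char) (f : Nat) (p : Int) :
    cs.reverse.foldl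
        (fun (st : Nat × Int) i => (st.1 + 1, st.2 + ((PySem.Int.ofChars? [i]).getD 0) * 7 ^ st.1)) (f, p)
      = (f + cs.length, p + pvValue cs * 7 ^ f) := by
  induction cs using List.reverseRecOn generalizing f p with
  | nil => simp [pvValue]
  | append_singleton cs c ih =>
    rw [List.reverse_append, List.reverse_singleton, List.singleton_append, List.foldl_cons, ih,
      pvValue_append]
    refine Prod.ext (by simp; omega) ?_
    simp [pow_succ]
    ring

-- ===== VERDICT (by name: the statement is the Claim_ definition above) =====
theorem faithful_spec : Claim_equal_faithful := by
  intro n _ _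
  show _ = _
  unfold faithful faithful_alt
  simp only [pv_loop_general (pvX n) 0 0]
  norm_num
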